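-- pv_equiv track=rewrite | github.com/pypi-data/pypi-mirror-401 | packages/xython/xython-4.2.0.tar.gz/xython-4.2.0/src/xython/xy_util.py | get_nos_in_l2d_by_same_xline
-- ===== SOURCE A (Python) =====
-- def get_nos_in_l2d_by_same_xline(input_2dlist=""):
-- 	"""
-- 	2dlist의 자료의 형태로 된것중에서
-- 	위에서 부터 같은것을 삭제 한다
-- 	0,3,5의 3개가 같은것이라면 제일 앞의 1개는 제외하고 [3,5]를 돌려준다
-- 	"""
--
-- 	all_datas = input_2dlist
-- 	total_len = len(all_datas)
-- 	same_nos = []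
-- 	for no in range(total_len):
-- 		if no in same_nos:
-- 			pass
-- 		else:
-- 			one_list = all_datas[no]
-- 			for num in range(no + 1, total_len):
-- 				if num in same_nos:
-- 					pass
-- 				else:
-- 					if one_list == all_datas[num]:
-- 						same_nos.append(num)
-- 	return same_nos
-- ===== SOURCE B (Python) =====
-- def get_nos_in_l2d_by_same_xline(input_2dlist=""):
-- 	groups = {}
-- 	for i, row in enumerate(input_2dlist):
-- 		groups.setdefault(tuple(row), []).append(i)
-- 	return [i for idxs in groups.values() for i in idxs[1:]]
-- ===== Notes on version B (the rewrite author's own statement) =====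
-- stated objective: alternative
-- what changed: Replaces the nested scan-and-skip loops with a mutable same_nos list by a single hash-grouping pass (dict row-tuple -> index list) followed by flattening each group's tail, relying on dict insertion order for the grouped-by-first-occurrence output order.
import Mathlib
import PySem

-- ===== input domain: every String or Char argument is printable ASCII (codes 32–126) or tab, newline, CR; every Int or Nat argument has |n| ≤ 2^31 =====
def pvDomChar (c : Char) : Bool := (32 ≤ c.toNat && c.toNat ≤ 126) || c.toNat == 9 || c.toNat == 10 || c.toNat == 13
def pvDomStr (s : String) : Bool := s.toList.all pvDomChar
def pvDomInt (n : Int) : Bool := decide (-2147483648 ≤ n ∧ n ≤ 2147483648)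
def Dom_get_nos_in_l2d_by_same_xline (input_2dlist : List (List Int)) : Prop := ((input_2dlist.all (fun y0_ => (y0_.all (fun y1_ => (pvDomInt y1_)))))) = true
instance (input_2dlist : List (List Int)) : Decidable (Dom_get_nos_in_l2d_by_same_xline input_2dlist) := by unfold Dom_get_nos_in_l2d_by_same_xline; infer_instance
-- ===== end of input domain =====

-- B replaces A's nested scan-and-skip loops by one dict-grouping pass plus a flatten of each
-- group's tail (objective: alternative).

-- ===== PORT A =====
-- every index access is in range (no/num drawn from range(len)), so pyGetD's default is never used
def get_nos_in_l2d_by_same_xline (input_2dlist : List (List Int)) : List Int :=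
  let all_datas := input_2dlist
  let total_len : Int := PySem.List.len all_datas
  (PySem.List.pyRange 0 total_len).foldl (fun same_nos no =>
    if same_nos.contains no then same_nos
    else
      let one_list := PySem.List.pyGetD all_datas no []
      (PySem.List.pyRange (no + 1) total_len).foldl (fun same_nos num =>
        if same_nos.contains num then same_nos
        else if one_list == PySem.List.pyGetD all_datas num [] then
          same_nos ++ [num]
        else same_nos) same_nos) []

-- ===== PORT B =====
-- groups.setdefault(tuple(row), []).append(i)  ==  groups[row] = groups.get(row, []) + [i]  == Dict.modify
def get_nos_in_l2d_by_same_xline_alt (input_2dlist : List (List Int)) : List Int :=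
  let groups : PySem.Dict (List Int) (List Int) :=
    (PySem.List.enumerate input_2dlist).foldl
      (fun d p => d.modify p.2 [] (fun idxs => idxs ++ [p.1])) PySem.Dict.empty
  groups.values.flatMap (fun idxs => idxs.drop 1)    -- idxs[1:] = drop 1

-- ===== PRECONDITION & SPEC =====
def Spec_get_nos_in_l2d_by_same_xline (input_2dlist : List (List Int)) (out : List Int) : Prop := out = get_nos_in_l2d_by_same_xline_alt input_2dlist
instance (input_2dlist : List (List Int)) (out : List Int) : Decidable (Spec_get_nos_in_l2d_by_same_xline input_2dlist out) := by unfold Spec_get_nos_in_l2d_by_same_xline; infer_instance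

-- ===== CLAIM (what is proved, stated in full; the proofs are below) =====
def Claim_equal_get_nos_in_l2d_by_same_xline : Prop := ∀ (input_2dlist : List (List Int)), Dom_get_nos_in_l2d_by_same_xline input_2dlist → Spec_get_nos_in_l2d_by_same_xline input_2dlist (get_nos_in_l2d_by_same_xline input_2dlist)

-- ===== LEMMAS AND PROOFS =====

-- ascending list of the (Int) indices at which row r occurs in xs
def pvOcc (xs : List (List Int)) (r : List Int) : List Int :=
  (PySem.List.pyRange 0 (PySem.List.len xs)).filter
    (fun j => PySem.List.pyGetD xs j [] == r)

-- the common value of both programs: per distinct row (first-occurrence order), all its indices after the first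
def pvTarget (xs : List (List Int)) : List Int :=
  (PySem.Set.ofList xs).flatMap (fun r => (pvOcc xs r).drop 1)

lemma pvPyRange_nodup_aux : ∀ (n : Nat) (a b : Int), (b - a).toNat ≤ n →
    (PySem.List.pyRange a b).Nodup := by
  intro n
  induction n with
  | zero =>
    intro a b h
    have hr : PySem.List.pyRange a b = [] := by
      refine List.eq_nil_iff_forall_not_mem.mpr ?_
      intro x hx
      rw [PySem.List.mem_pyRange_one] at hx
      omega
    simp [hr]
  | succ n ih =>
    intro a b h
    by_cases hab : a < b
    · rw [PySem.List.pyRange_one_cons hab]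
      refine List.Nodup.cons ?_ (ih (a + 1) b (by omega))
      intro hmem
      rw [PySem.List.mem_pyRange_one] at hmem
      omega
    · have hr : PySem.List.pyRange a b = [] := by
        refine List.eq_nil_iff_forall_not_mem.mpr ?_
        intro x hx
        rw [PySem.List.mem_pyRange_one] at hx
        omega
      simp [hr]

lemma pvPyRange_nodup (a b : Int) : (PySem.List.pyRange a b).Nodup :=
  pvPyRange_nodup_aux (b - a).toNat a b le_rfl

-- the inner loop of A: with no relevant index already present, it appends exactly the matches
lemma pvInner (xs : List (List Int)) (r : List Int) :
    ∀ (L s₀ : List Int), L.Nodup →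
    (∀ j ∈ L, (r == PySem.List.pyGetD xs j []) = true → j ∉ s₀) →
    L.foldl (fun acc num =>
        if acc.contains num then acc
        else if r == PySem.List.pyGetD xs num [] then acc ++ [num]
        else acc) s₀
      = s₀ ++ L.filter (fun num => r == PySem.List.pyGetD xs num []) := by
  intro L
  induction L with
  | nil => intro s₀ _ _; simp
  | cons j t ih =>
    intro s₀ hnd hfresh
    have hndt := hnd.of_cons
    have hjt : j ∉ t := (List.nodup_cons.mp hnd).1
    by_cases hq : (r == PySem.List.pyGetD xs j []) = true
    · have hj : j ∉ s₀ := hfresh j (by simp) hq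
      have hc : s₀.contains j = false := by
        simpa using hj
      simp only [List.foldl_cons, hc, Bool.false_eq_true, if_false, hq, if_true]
      rw [ih (s₀ ++ [j]) hndt ?_]
      · simp [hq]
      · intro k hk hkq
        have := hfresh k (by simp [hk]) hkq
        simp only [List.mem_append, List.mem_singleton]
        rintro (h | rfl)
        · exact this h
        · exact hjt hk
    · have hq' : (r == PySem.List.pyGetD xs j []) = false := by
        simpa using hq
      have hstep : (if s₀.contains j then s₀
          else if r == PySem.List.pyGetD xs j [] then s₀ ++ [j] else s₀) = s₀ := by
        simp [hq']
      simp only [List.foldl_cons, hstep]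
      rw [ih s₀ hndt (fun k hk hkq => hfresh k (by simp [hk]) hkq)]
      simp [hq']

-- splitting pvOcc at index m
lemma pvOcc_split (xs : List (List Int)) (r : List Int) (m : Nat) (hm : m ≤ xs.length) :
    pvOcc xs r =
      (PySem.List.pyRange 0 (m : Int)).filter (fun j => PySem.List.pyGetD xs j [] == r)
      ++ (PySem.List.pyRange (m : Int) (xs.length : Int)).filter (fun j => PySem.List.pyGetD xs j [] == r) := by
  unfold pvOcc
  rw [PySem.List.len, PySem.List.pyRange_one_append 0 (m : Int) (xs.length : Int)
    (by exact_mod_cast Nat.zero_le m) (by exact_mod_cast hm)]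
  simp [List.filter_append]

-- a member of a prefix filter names a row of xs.take m
lemma pvPrefix_mem (xs : List (List Int)) (r : List Int) (m : Nat) (hm : m ≤ xs.length)
    (j : Int)
    (hj : j ∈ (PySem.List.pyRange 0 (m : Int)).filter (fun j => PySem.List.pyGetD xs j [] == r)) :
    r ∈ xs.take m := by
  rw [List.mem_filter, PySem.List.mem_pyRange_one] at hj
  obtain ⟨⟨h0, hlt⟩, hq⟩ := hj
  have hk : j = ((j.toNat : Nat) : Int) := by omega
  have hklt : j.toNat < m := by omega
  have hkn : j.toNat < xs.length := by omega
  rw [hk, PySem.List.pyGetD_natCast, List.getD_eq_getElem xs [] hkn, beq_iff_eq] at hq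
  have h2 : (xs.take m)[j.toNat]'(by simp; omega) = r := by
    rw [List.getElem_take]; exact hq
  rw [← h2]
  exact List.getElem_mem _

-- r ∈ xs.take m gives a matching prefix index
lemma pvPrefix_nonempty (xs : List (List Int)) (r : List Int) (m : Nat) (hm : m ≤ xs.length)
    (hr : r ∈ xs.take m) :
    (PySem.List.pyRange 0 (m : Int)).filter (fun j => PySem.List.pyGetD xs j [] == r) ≠ [] := by
  obtain ⟨k, hk, hkr⟩ := List.getElem_of_mem hr
  have hkm : k < m := by simp at hk; omega
  have hkn : k < xs.length := by omega
  rw [List.getElem_take] at hkr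
  intro hnil
  have hmem : (k : Int) ∈ (PySem.List.pyRange 0 (m : Int)).filter (fun j => PySem.List.pyGetD xs j [] == r) := by
    rw [List.mem_filter, PySem.List.mem_pyRange_one]
    refine ⟨⟨by exact_mod_cast Nat.zero_le k, by exact_mod_cast hkm⟩, ?_⟩
    rw [PySem.List.pyGetD_natCast, List.getD_eq_getElem xs [] hkn, hkr]
    simp
  simp [hnil] at hmem

-- Set.ofList of a snoc
lemma pvOfList_snoc (l : List (List Int)) (x : List Int) :
    PySem.Set.ofList (l ++ [x]) =
      if x ∈ l then PySem.Set.ofList l else PySem.Set.ofList l ++ [x] := by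
  have h1 : PySem.Set.ofList (l ++ [x]) = (PySem.Set.ofList l).add x := by
    unfold PySem.Set.ofList
    rw [List.foldl_append]
    rfl
  rw [h1]
  unfold PySem.Set.add
  by_cases hx : x ∈ l
  · have hc : (PySem.Set.ofList l).contains x = true := by
      simpa using (PySem.Set.mem_ofList l x).mpr hx
    rw [if_pos hc, if_pos hx]
  · have hc : (PySem.Set.ofList l).contains x = false := by
      rw [Bool.eq_false_iff]
      intro h
      exact hx ((PySem.Set.mem_ofList l x).mp (List.contains_iff_mem.mp h))
    rw [hc, if_neg hx]
    simp

-- A's outer loop invariant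
lemma pvOuter (xs : List (List Int)) :
    ∀ (m : Nat), m ≤ xs.length →
    (PySem.List.pyRange 0 (m : Int)).foldl (fun same_nos no =>
      if same_nos.contains no then same_nos
      else
        (PySem.List.pyRange (no + 1) (PySem.List.len xs)).foldl (fun same_nos num =>
          if same_nos.contains num then same_nos
          else if PySem.List.pyGetD xs no [] == PySem.List.pyGetD xs num [] then
            same_nos ++ [num]
          else same_nos) same_nos) []
    = (PySem.Set.ofList (xs.take m)).flatMap (fun r => (pvOcc xs r).drop 1) := by
  intro m
  induction m with
  | zero => intro _; simp [PySem.Set.ofList, PySem.Set.empty]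
  | succ m ih =>
    intro hm1
    have hm : m ≤ xs.length := by omega
    have hmlt : m < xs.length := by omega
    rw [PySem.List.pyRange_zero_natCast (m + 1), List.range_succ, List.map_append,
        List.foldl_append, ← PySem.List.pyRange_zero_natCast m, ih hm]
    set S := (PySem.Set.ofList (xs.take m)).flatMap (fun r => (pvOcc xs r).drop 1) with hS
    have hget : PySem.List.pyGetD xs (m : Int) [] = xs[m]'hmlt := by
      rw [PySem.List.pyGetD_natCast, List.getD_eq_getElem]
    have htake : xs.take (m + 1) = xs.take m ++ [xs[m]'hmlt] := by
      rw [List.take_add_one, List.getElem?_eq_getElem hmlt]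
      rfl
    by_cases hr : xs[m]'hmlt ∈ xs.take m
    · -- m is a later duplicate: it is already in S and this iteration is a no-op
      have hmemS : (m : Int) ∈ S := by
        rw [hS, List.mem_flatMap]
        refine ⟨xs[m]'hmlt, (PySem.Set.mem_ofList _ _).mpr hr, ?_⟩
        show (m : Int) ∈ (pvOcc xs (xs[m]'hmlt)).drop 1
        have hsplit := pvOcc_split xs (xs[m]'hmlt) m hm
        obtain ⟨a, t, hpre⟩ :=
          List.exists_cons_of_ne_nil (pvPrefix_nonempty xs (xs[m]'hmlt) m hm hr)
        rw [hsplit, hpre]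
        simp only [List.cons_append, List.drop_succ_cons, List.drop_zero]
        rw [List.mem_append]
        right
        rw [List.mem_filter, PySem.List.mem_pyRange_one]
        refine ⟨⟨le_refl _, by exact_mod_cast hmlt⟩, ?_⟩
        rw [hget]
        simp
      have hc : S.contains ((m : Nat) : Int) = true := by simpa using hmemS
      simp only [List.map_cons, List.map_nil, List.foldl_cons, List.foldl_nil, hc, if_true]
      rw [htake, pvOfList_snoc, if_pos hr]
    · -- m is a first occurrence: the inner loop appends all later matches
      have hnotS : (m : Int) ∉ S := by
        rw [hS, List.mem_flatMap]
        rintro ⟨r', hr', hmem⟩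
        have hmem' : (m : Int) ∈ pvOcc xs r' := List.mem_of_mem_drop hmem
        unfold pvOcc at hmem'
        rw [List.mem_filter] at hmem'
        have h2 := hmem'.2
        rw [hget, beq_iff_eq] at h2
        rw [h2] at hr
        exact hr ((PySem.Set.mem_ofList _ _).mp hr')
      have hc : S.contains ((m : Nat) : Int) = false := by
        rw [Bool.eq_false_iff]
        intro h
        exact hnotS (List.contains_iff_mem.mp h)
      simp only [List.map_cons, List.map_nil, List.foldl_cons, List.foldl_nil, hc, Bool.false_eq_true, if_false, hget]
      rw [PySem.List.len]
      rw [pvInner xs (xs[m]'hmlt) (PySem.List.pyRange ((m : Int) + 1) (xs.length : Int)) S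
        (pvPyRange_nodup _ _) ?_]
      · rw [htake, pvOfList_snoc, if_neg hr, List.flatMap_append]
        congr 1
        simp only [List.flatMap_cons, List.flatMap_nil, List.append_nil]
        have hsplit := pvOcc_split xs (xs[m]'hmlt) m hm
        have hprenil : (PySem.List.pyRange 0 (m : Int)).filter
            (fun j => PySem.List.pyGetD xs j [] == xs[m]'hmlt) = [] := by
          rw [List.filter_eq_nil_iff]
          intro j hj hq
          exact hr (pvPrefix_mem xs (xs[m]'hmlt) m hm j (List.mem_filter.mpr ⟨hj, hq⟩))
        rw [hsplit, hprenil, List.nil_append,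
          show PySem.List.pyRange (m : Int) (xs.length : Int)
              = (m : Int) :: PySem.List.pyRange ((m : Int) + 1) (xs.length : Int) from
            PySem.List.pyRange_one_cons (by exact_mod_cast hmlt)]
        have hqm : (PySem.List.pyGetD xs (m : Int) [] == xs[m]'hmlt) = true := by
          rw [hget]; simp
        rw [List.filter_cons, hqm]
        simp only [if_true, List.drop_succ_cons, List.drop_zero]
        apply List.filter_congr
        intro j _
        simp [eq_comm]
      · intro j hj hq
        rw [hS, List.mem_flatMap]
        rintro ⟨r', hr', hmem⟩
        have hmem' : j ∈ pvOcc xs r' := List.mem_of_mem_drop hmem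
        unfold pvOcc at hmem'
        rw [List.mem_filter] at hmem'
        have h1 := hmem'.2
        rw [beq_iff_eq] at h1 hq
        rw [← h1, ← hq] at hr'
        exact hr ((PySem.Set.mem_ofList _ _).mp hr')

-- A computes pvTarget
lemma pvA_eq (xs : List (List Int)) : get_nos_in_l2d_by_same_xline xs = pvTarget xs := by
  show (PySem.List.pyRange 0 (PySem.List.len xs)).foldl (fun same_nos no =>
      if same_nos.contains no then same_nos
      else
        (PySem.List.pyRange (no + 1) (PySem.List.len xs)).foldl (fun same_nos num =>
          if same_nos.contains num then same_nos
          else if PySem.List.pyGetD xs no [] == PySem.List.pyGetD xs num [] then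
            same_nos ++ [num]
          else same_nos) same_nos) []
    = pvTarget xs
  have h := pvOuter xs xs.length le_rfl
  rw [List.take_length] at h
  simp only [PySem.List.len] at h ⊢
  rw [h]
  rfl

-- B computes pvTarget
lemma pvB_eq (xs : List (List Int)) : get_nos_in_l2d_by_same_xline_alt xs = pvTarget xs := by
  show ((PySem.List.enumerate xs).foldl
      (fun d p => d.modify p.2 [] (fun idxs => idxs ++ [p.1]))
      PySem.Dict.empty).values.flatMap (fun idxs => idxs.drop 1) = pvTarget xs
  set groups := (PySem.List.enumerate xs).foldl
      (fun d p => d.modify p.2 [] (fun idxs => idxs ++ [p.1])) PySem.Dict.empty with hgroups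
  have hkeys : groups.keys = PySem.Set.ofList xs := by
    rw [hgroups, PySem.Dict.keys_foldl_modify_key (PySem.List.enumerate xs) Prod.snd []
      (fun _ p idxs => idxs ++ [p.1]) PySem.Dict.empty]
    rw [PySem.List.map_snd_enumerate, PySem.Dict.keys_empty]
    rfl
  have hnodup : groups.keys.Nodup := by
    rw [hkeys]; exact PySem.Set.nodup_ofList xs
  have hgetD : ∀ r, groups.getD r [] = pvOcc xs r := by
    intro r
    have hswap : groups = ((PySem.List.enumerate xs).map (fun p => (p.2, p.1))).foldl
        (fun d p => d.modify p.1 [] (fun idxs => idxs ++ [p.2])) PySem.Dict.empty := by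
      rw [hgroups, List.foldl_map]
    rw [hswap, PySem.Dict.getD_foldl_modify_append]
    simp only [PySem.Dict.getD_empty, List.nil_append]
    rw [PySem.List.enumerate_eq_map_pyRange xs []]
    unfold pvOcc
    rw [PySem.List.len]
    simp [List.filter_map, List.map_map, Function.comp_def]
  rw [PySem.Dict.values_eq_map_keys groups hnodup [], List.flatMap_map, hkeys]
  unfold pvTarget
  simp only [hgetD]

-- ===== VERDICT (by name: the statement is the Claim_ definition above) =====
theorem get_nos_in_l2d_by_same_xline_spec : Claim_equal_get_nos_in_l2d_by_same_xline := by
  intro xs _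
  unfold Spec_get_nos_in_l2d_by_same_xline
  rw [pvA_eq, pvB_eq]
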